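-- pv_equiv track=rewrite | github.com/yubinbai/pcuva-problems | UVa 336 - A Node Too Far/main.py | solve
-- ===== SOURCE A (Python) =====
-- import collections
--
-- INF = 1 << 31
--
-- def solve(par):
--     def bfs(start):
--         for v in graph:
--             dist[v] = INF
--             for v2 in graph[v]:
--                 dist[v2] = INF
--         dist[start] = 0
--         q = collections.deque()
--         q.append(start)
--         while q:
--             curr = q.popleft()
--             for v in graph[curr]:
--                 if dist[v] == INF:
--                     dist[v] = dist[curr] + 1
--                     q.append(v)
--
--     NC, graph, dest = par
--     dist = {}
--     result = []
--     for d in dest: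
--         bfs(d[0])
--         counter = sum([dist[v] > d[1] for v in dist])
--         result.append('%d nodes not reachable from node %d with TTL = %d.' %
--                       (counter, d[0], d[1]))
--     return '\n'.join(result)
-- ===== SOURCE B (Python) =====
-- # B (per the reviewer's hint): no distance labels at all -- per query a
-- # depth-limited expansion, capped by the TTL, of a 'within-TTL' set, then
-- # counter = |all nodes| - |within|; the node universe is computed once.
-- def solve(par):
--     NC, graph, dest = par
--     nodes = set(graph)
--     for vs in graph.values():
--         nodes.update(vs)
--     result = []
--     for q in dest:
--         src, ttl = q[0], q[1]
--         within = set()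
--         if ttl >= 0:
--             within = {src}
--             frontier = [src]
--             depth = 0
--             while frontier and depth < ttl:
--                 depth += 1
--                 nxt = []
--                 for u in frontier:
--                     for v in graph.get(u, ()):
--                         if v not in within:
--                             within.add(v)
--                             nxt.append(v)
--                 frontier = nxt
--         result.append('%d nodes not reachable from node %d with TTL = %d.' %
--                       (len(nodes) - len(within), src, ttl))
--     return '\n'.join(result)
-- ===== Notes on version B (the rewrite author's own statement) =====
-- stated objective: alternative
-- what changed: Replaces A's per-query deque BFS over a distance dict (re-initialized to an INF sentinel over the whole node universe, then counted by dist>TTL) with a distance-free depth-limited expansion: a 'within-TTL' set is grown for at most TTL rounds and the answer is the complement count over a node universe computed once.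
import Mathlib
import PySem

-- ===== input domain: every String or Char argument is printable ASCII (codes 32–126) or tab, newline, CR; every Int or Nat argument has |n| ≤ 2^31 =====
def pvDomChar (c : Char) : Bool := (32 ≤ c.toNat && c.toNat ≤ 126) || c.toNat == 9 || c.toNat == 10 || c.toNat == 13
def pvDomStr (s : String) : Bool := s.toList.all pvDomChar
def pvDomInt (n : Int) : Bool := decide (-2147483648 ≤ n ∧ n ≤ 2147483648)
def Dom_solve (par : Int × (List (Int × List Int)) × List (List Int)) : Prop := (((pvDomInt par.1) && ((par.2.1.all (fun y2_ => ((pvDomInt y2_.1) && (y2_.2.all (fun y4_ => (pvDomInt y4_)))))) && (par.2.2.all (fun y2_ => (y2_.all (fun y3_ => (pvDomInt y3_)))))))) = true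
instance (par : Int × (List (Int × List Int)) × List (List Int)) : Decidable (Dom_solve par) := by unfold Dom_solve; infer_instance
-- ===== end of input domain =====

-- One honest line: B drops A's per-query INF-initialized distance dict and deque BFS
-- entirely — it grows a 'within-TTL' set by at most TTL depth-limited rounds and reports
-- the complement count over a node universe computed once (alternative decomposition).

def pvINF : Int := 2147483648

-- shared output formatting ('%d nodes not reachable from node %d with TTL = %d.')
def pvLine (counter src ttl : Int) : String :=
  PySem.Int.toStr counter ++ " nodes not reachable from node " ++ PySem.Int.toStr src ++
    " with TTL = " ++ PySem.Int.toStr ttl ++ "."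

-- ===== PORT A =====
-- 'for v in graph: dist[v] = INF; for v2 in graph[v]: dist[v2] = INF'
def pvInit (g : PySem.Dict Int (List Int)) (dist : PySem.Dict Int Int) : PySem.Dict Int Int :=
  g.items.foldl (fun d kv => kv.2.foldl (fun d2 v2 => d2.insert v2 pvINF) (d.insert kv.1 pvINF)) dist

-- the 'while q:' loop; fuel only makes the recursion total (on admitted inputs it never runs out)
def pvBfsA (g : PySem.Dict Int (List Int)) :
    Nat → PySem.Dict Int Int → List Int → PySem.Dict Int Int
  | 0, dist, _ => dist
  | _ + 1, dist, [] => dist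
  | fuel + 1, dist, curr :: rest =>
    let s := (g.getD curr []).foldl
      (fun (p : PySem.Dict Int Int × List Int) v =>
        if p.1.getD v pvINF == pvINF then
          (p.1.insert v (p.1.getD curr pvINF + 1), p.2 ++ [v])
        else p) (dist, ([] : List Int))
    pvBfsA g fuel s.1 (rest ++ s.2)

def solve (par : Int × (List (Int × List Int)) × List (List Int)) : String :=
  let g := PySem.Dict.ofList par.2.1
  let r := par.2.2.foldl
    (fun (st : PySem.Dict Int Int × List String) d =>
      let start := PySem.List.pyGetD d 0 0
      let ttl := PySem.List.pyGetD d 1 0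
      let d1 := (pvInit g st.1).insert start 0
      let dist := pvBfsA g (2 * d1.size + 2) d1 [start]
      let counter := (dist.items.map (fun kv => if kv.2 > ttl then (1 : Int) else 0)).sum
      (dist, st.2 ++ [pvLine counter start ttl]))
    (PySem.Dict.empty, ([] : List String))
  PySem.Str.join "\n" r.2

-- ===== PORT B =====
-- the 'while frontier and depth < ttl:' loop of Source B: one level per iteration, no
-- distance labels, only the growing 'within' set; fuel is a totality guard only
def pvWithin (g : PySem.Dict Int (List Int)) (ttl : Int) :
    Nat → PySem.Set Int → List Int → Int → PySem.Set Int
  | 0, within, _, _ => within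
  | _ + 1, within, [], _ => within
  | fuel + 1, within, u :: rest, depth =>
    if depth < ttl then
      let s := (u :: rest).foldl (fun (p : PySem.Set Int × List Int) u' =>
        (g.getD u' []).foldl (fun (p2 : PySem.Set Int × List Int) v =>
          if PySem.Set.contains p2.1 v then p2 else (PySem.Set.add p2.1 v, p2.2 ++ [v])) p)
        (within, ([] : List Int))
      pvWithin g ttl fuel s.1 s.2 (depth + 1)
    else within

def solve_alt (par : Int × (List (Int × List Int)) × List (List Int)) : String :=
  let g := PySem.Dict.ofList par.2.1
  let nodes : PySem.Set Int :=
    g.values.foldl (fun s vs => PySem.Set.update s vs) (PySem.Set.ofList g.keys)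
  PySem.Str.join "\n" (par.2.2.map (fun q =>
    let src := PySem.List.pyGetD q 0 0
    let ttl := PySem.List.pyGetD q 1 0
    let within : PySem.Set Int :=
      if 0 ≤ ttl then pvWithin g ttl (nodes.length + 2) (PySem.Set.ofList [src]) [src] 0
      else PySem.Set.ofList []
    pvLine ((nodes.length : Int) - (within.length : Int)) src ttl))

-- ===== PRECONDITION & SPEC =====
-- Pre_ excludes exactly: (a) query rows of length < 2 (A raises IndexError) and query sources
-- that are not graph keys (A raises KeyError); (b) unless dest is empty, graphs listing a
-- neighbour that is not a graph key — if such a node is reachable both A and B raise KeyError,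
-- and since reachability is not closed-form this is stated conservatively (it also excludes
-- some inputs on which A returns and B returns the same value, see the first cite); (c) queries
-- whose TTL reaches 2^31, the value A uses as its INF marker for 'unreachable': a TTL beyond any
-- possible hop count, where 'how many nodes are farther than TTL' is unspecified for unreachable
-- nodes — A's sentinel comparison reports them as within TTL, B counts them (second cite);
-- (d) astronomical inputs with ≥ 2^31 graph entries, where BFS levels could collide with the sentinel.
def Pre_solve (par : Int × (List (Int × List Int)) × List (List Int)) : Prop :=
  (∀ q ∈ par.2.2, 2 ≤ q.length ∧ (PySem.Dict.ofList par.2.1).contains (PySem.List.pyGetD q 0 0) = true ∧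
      PySem.List.pyGetD q 1 0 < 2147483648) ∧
  (par.2.2 = [] ∨ ∀ kv ∈ (PySem.Dict.ofList par.2.1).items, ∀ v ∈ kv.2,
      (PySem.Dict.ofList par.2.1).contains v = true) ∧
  par.2.1.length + ((par.2.1.map (fun kv => kv.2.length)).sum) < 2147483648

instance (par : Int × (List (Int × List Int)) × List (List Int)) : Decidable (Pre_solve par) := by
  unfold Pre_solve; infer_instance

def pvWitness_solve : (Int × (List (Int × List Int)) × List (List Int)) :=
  (2, [(1, [2]), (2, [1])], [[1, 1]])

def Spec_solve (par : Int × (List (Int × List Int)) × List (List Int)) (out : String) : Prop :=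
  out = solve_alt par
instance (par : Int × (List (Int × List Int)) × List (List Int)) (out : String) :
    Decidable (Spec_solve par out) := by unfold Spec_solve; infer_instance

-- ===== CLAIM (what is proved, stated in full; the proofs are below) =====
def Claim_equal_solve : Prop :=
  ∀ (par : Int × (List (Int × List Int)) × List (List Int)),
    Dom_solve par → Pre_solve par → Spec_solve par (solve par)

-- ===== LEMMAS AND PROOFS =====

-- the node universe as B computes it, and the list of all nodes A's init pass mentions
def pvU (g : PySem.Dict Int (List Int)) : PySem.Set Int :=
  g.values.foldl (fun s vs => PySem.Set.update s vs) (PySem.Set.ofList g.keys)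

def pvM (g : PySem.Dict Int (List Int)) : List Int :=
  g.items.flatMap (fun kv => kv.1 :: kv.2)

abbrev pvDI := PySem.Dict Int Int
abbrev pvDG := PySem.Dict Int (List Int)

-- proof-side ghost: the level-synchronous BFS dict (node ↦ its BFS level); A's deque run
-- and B's capped set run are both simulated against it
def pvBfsB (g : pvDG) :
    Nat → PySem.Dict Int Int → List Int → Int → PySem.Dict Int Int
  | 0, seen, _, _ => seen
  | _ + 1, seen, [], _ => seen
  | fuel + 1, seen, frontier, depth =>
    let s := frontier.foldl
      (fun (p : PySem.Dict Int Int × List Int) u =>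
        (g.getD u []).foldl
          (fun (p2 : PySem.Dict Int Int × List Int) v =>
            if p2.1.contains v then p2 else (p2.1.insert v (depth + 1), p2.2 ++ [v])) p)
      (seen, ([] : List Int))
    pvBfsB g fuel s.1 s.2 (depth + 1)

theorem pvBfsA_nil (g : pvDG) (m : Nat) (dist : pvDI) :
    pvBfsA g m dist [] = dist := by cases m <;> rfl

theorem pvBfsB_nil (g : pvDG) (m : Nat) (seen : pvDI) (depth : Int) :
    pvBfsB g m seen [] depth = seen := by cases m <;> rfl

theorem pvWithin_nil (g : pvDG) (ttl : Int) (m : Nat) (w : PySem.Set Int) (depth : Int) :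
    pvWithin g ttl m w [] depth = w := by cases m <;> rfl

theorem pvWithin_cons (g : PySem.Dict Int (List Int)) (ttl : Int) (fuel : Nat)
    (within : PySem.Set Int) (u : Int) (rest : List Int) (depth : Int) :
    pvWithin g ttl (fuel + 1) within (u :: rest) depth =
      if depth < ttl then
        (fun s : PySem.Set Int × List Int => pvWithin g ttl fuel s.1 s.2 (depth + 1))
          ((u :: rest).foldl (fun (p : PySem.Set Int × List Int) u' =>
            (g.getD u' []).foldl (fun (p2 : PySem.Set Int × List Int) v =>
              if PySem.Set.contains p2.1 v then p2 else (PySem.Set.add p2.1 v, p2.2 ++ [v])) p)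
            (within, ([] : List Int)))
      else within := by
  rw [pvWithin]

theorem size_eq_keys_length (d : pvDI) : d.size = d.keys.length := by
  simp [PySem.Dict.size, PySem.Dict.keys]

theorem mem_foldl_update (L : List (List Int)) (s : PySem.Set Int) (a : Int) :
    a ∈ L.foldl (fun s vs => PySem.Set.update s vs) s ↔ a ∈ s ∨ ∃ vs ∈ L, a ∈ vs := by
  induction L generalizing s with
  | nil => simp
  | cons vs L ih =>
    simp [List.foldl_cons, ih, PySem.Set.mem_update]
    tauto

theorem mem_pvU_iff (g : PySem.Dict Int (List Int)) (a : Int) :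
    a ∈ pvU g ↔ a ∈ pvM g := by
  unfold pvU pvM
  rw [mem_foldl_update]
  simp only [PySem.Set.mem_ofList, List.mem_flatMap, List.mem_map, List.mem_cons,
    PySem.Dict.keys, PySem.Dict.values]
  aesop

theorem nodup_foldl_update (L : List (List Int)) (s : PySem.Set Int) (h : s.Nodup) :
    (L.foldl (fun s vs => PySem.Set.update s vs) s).Nodup := by
  induction L generalizing s with
  | nil => exact h
  | cons vs L ih => exact ih _ (PySem.Set.nodup_update s vs h)

theorem nodup_pvU (g : PySem.Dict Int (List Int)) : (pvU g).Nodup :=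
  nodup_foldl_update _ _ (PySem.Set.nodup_ofList _)

theorem keys_mem_pvU (g : PySem.Dict Int (List Int)) (k : Int) (h : k ∈ g.keys) :
    k ∈ pvU g := by
  rw [mem_pvU_iff]
  simp only [PySem.Dict.keys, List.mem_map] at h
  obtain ⟨kv, hkv, rfl⟩ := h
  unfold pvM
  exact List.mem_flatMap.mpr ⟨kv, hkv, by simp⟩

theorem nbrs_mem_pvU (g : PySem.Dict Int (List Int)) (c v : Int) (h : v ∈ g.getD c []) :
    v ∈ pvU g := by
  rw [mem_pvU_iff]
  rw [PySem.Dict.getD_eq_get?_getD] at h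
  cases hg : g.get? c with
  | none => rw [hg] at h; simp at h
  | some vs =>
    rw [hg] at h; simp at h
    have := PySem.Dict.mem_items_of_get?_eq_some g hg
    unfold pvM
    exact List.mem_flatMap.mpr ⟨(c, vs), this, by simp [h]⟩

theorem length_le_of_nodup_subset (l u : List Int) (hl : l.Nodup) (hu : u.Nodup)
    (hs : ∀ x ∈ l, x ∈ u) : l.length ≤ u.length := by
  rw [← List.toFinset_card_of_nodup hl, ← List.toFinset_card_of_nodup hu]
  apply Finset.card_le_card
  intro x hx
  simp only [List.mem_toFinset] at *
  exact hs x hx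

theorem length_lt_of_nodup_ssubset (l u : List Int) (hl : l.Nodup) (hu : u.Nodup)
    (hs : ∀ x ∈ l, x ∈ u) (x : Int) (hxu : x ∈ u) (hxl : x ∉ l) : l.length < u.length := by
  rw [← List.toFinset_card_of_nodup hl, ← List.toFinset_card_of_nodup hu]
  apply Finset.card_lt_card
  constructor
  · intro y hy; simp only [List.mem_toFinset] at *; exact hs y hy
  · intro hsub
    exact hxl (by simpa using hsub (List.mem_toFinset.mpr hxu))

theorem pvInit_eq_flat (g : PySem.Dict Int (List Int)) (dist : PySem.Dict Int Int) :
    pvInit g dist = (pvM g).foldl (fun d v => d.insert v pvINF) dist := by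
  unfold pvInit pvM
  induction g.items generalizing dist with
  | nil => rfl
  | cons kv L ih =>
    rw [List.flatMap_cons, List.foldl_append, List.foldl_cons, List.foldl_cons]
    exact ih _

theorem insINF_get?_not_mem (L : List Int) (dist : PySem.Dict Int Int) (k : Int) (h : k ∉ L) :
    (L.foldl (fun d v => d.insert v pvINF) dist).get? k = dist.get? k := by
  induction L generalizing dist with
  | nil => rfl
  | cons v L ih =>
    rw [List.foldl_cons, ih _ (fun hk => h (List.mem_cons_of_mem _ hk))]
    exact PySem.Dict.get?_insert_of_ne _ _ (fun hk : k = v => h (by simp [hk]))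

theorem insINF_get?_mem (L : List Int) (dist : PySem.Dict Int Int) (k : Int) (h : k ∈ L) :
    (L.foldl (fun d v => d.insert v pvINF) dist).get? k = some pvINF := by
  induction L generalizing dist with
  | nil => simp at h
  | cons v L ih =>
    rw [List.foldl_cons]
    by_cases hk : k ∈ L
    · exact ih _ hk
    · have : k = v := by rcases List.mem_cons.mp h with h' | h'; exact h'; exact absurd h' hk
      subst this
      rw [insINF_get?_not_mem _ _ _ hk]
      exact PySem.Dict.get?_insert_self _ _ _

theorem insINF_mem_keys (L : List Int) (dist : PySem.Dict Int Int) (k : Int) :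
    k ∈ (L.foldl (fun d v => d.insert v pvINF) dist).keys ↔ k ∈ dist.keys ∨ k ∈ L := by
  rw [PySem.Dict.keys_foldl_insert L (fun _ _ => pvINF) dist]
  exact PySem.Set.mem_update _ _ _

theorem insINF_nodup (L : List Int) (dist : PySem.Dict Int Int) (h : dist.keys.Nodup) :
    (L.foldl (fun d v => d.insert v pvINF) dist).keys.Nodup :=
  PySem.Dict.nodup_keys_foldl_insert L (fun _ _ => pvINF) dist h

theorem inner_sim (g : pvDG) (depth : Int) (hINF : depth + 1 < pvINF) (curr : Int)
    (nbrs : List Int) :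
    ∀ (dist seen : pvDI) (accA accB : List Int),
    (∀ v ∈ nbrs, v ∈ pvU g) →
    (∀ v ∈ pvU g, dist.get? v = some (seen.getD v pvINF)) →
    (∀ k, k ∈ dist.keys ↔ k ∈ pvU g) → dist.keys.Nodup →
    seen.keys.Nodup → (∀ k ∈ seen.keys, k ∈ pvU g) →
    (∀ k w, seen.get? k = some w → 0 ≤ w ∧ w ≤ depth + 1) →
    seen.get? curr = some depth →
    ∃ (dist' seen' : pvDI) (Δ : List Int),
      nbrs.foldl (fun (p : pvDI × List Int) v =>
          if p.1.getD v pvINF == pvINF then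
            (p.1.insert v (p.1.getD curr pvINF + 1), p.2 ++ [v])
          else p) (dist, accA) = (dist', accA ++ Δ)
      ∧ nbrs.foldl (fun (p2 : pvDI × List Int) v =>
          if p2.1.contains v then p2 else (p2.1.insert v (depth + 1), p2.2 ++ [v])) (seen, accB)
          = (seen', accB ++ Δ)
      ∧ (∀ k, seen'.get? k = if k ∈ Δ then some (depth + 1) else seen.get? k)
      ∧ (∀ k, k ∈ seen'.keys ↔ k ∈ seen.keys ∨ k ∈ Δ)
      ∧ seen'.keys.Nodup
      ∧ Δ.Nodup
      ∧ (∀ v ∈ Δ, v ∈ pvU g ∧ v ∉ seen.keys)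
      ∧ (∀ v ∈ pvU g, dist'.get? v = some (seen'.getD v pvINF))
      ∧ (∀ k, k ∈ dist'.keys ↔ k ∈ pvU g)
      ∧ dist'.keys.Nodup
      ∧ seen'.size = seen.size + Δ.length := by
  induction nbrs with
  | nil =>
    intro dist seen accA accB _ hC hK hKn hSn hSU hvals hcurr
    exact ⟨dist, seen, [], by simp, by simp, by simp, by simp, hSn, by simp, by simp, hC, hK, hKn, by simp⟩
  | cons v nbrs ih =>
    intro dist seen accA accB hn hC hK hKn hSn hSU hvals hcurr
    have hvU : v ∈ pvU g := hn v (by simp)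
    have hgetDv : dist.getD v pvINF = seen.getD v pvINF := by
      rw [PySem.Dict.getD_eq_get?_getD, hC v hvU]; rfl
    by_cases hv : v ∈ seen.keys
    · -- already seen: both sides skip
      have hw : ∃ w, seen.get? v = some w := by
        cases h : seen.get? v with
        | none => exact absurd ((PySem.Dict.get?_eq_none_iff_not_mem_keys seen v).mp h) (by simp [hv])
        | some w => exact ⟨w, rfl⟩
      obtain ⟨w, hw⟩ := hw
      have hwb := hvals v w hw
      have hwne : w ≠ pvINF := by intro h; subst h; omega
      have hgD : seen.getD v pvINF = w := by rw [PySem.Dict.getD_eq_get?_getD, hw]; rfl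
      have hAtest : (dist.getD v pvINF == pvINF) = false := by
        rw [hgetDv, hgD]; simp [hwne]
      have hBtest : seen.contains v = true := (PySem.Dict.contains_iff_mem_keys seen v).mpr hv
      have stepA : ((v :: nbrs).foldl (fun (p : pvDI × List Int) v =>
          if p.1.getD v pvINF == pvINF then
            (p.1.insert v (p.1.getD curr pvINF + 1), p.2 ++ [v])
          else p) (dist, accA)) = nbrs.foldl (fun (p : pvDI × List Int) v =>
          if p.1.getD v pvINF == pvINF then
            (p.1.insert v (p.1.getD curr pvINF + 1), p.2 ++ [v])
          else p) (dist, accA) := by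
        rw [List.foldl_cons]; congr 1; simp [hAtest]
      have stepB : ((v :: nbrs).foldl (fun (p2 : pvDI × List Int) v =>
          if p2.1.contains v then p2 else (p2.1.insert v (depth + 1), p2.2 ++ [v])) (seen, accB))
          = nbrs.foldl (fun (p2 : pvDI × List Int) v =>
          if p2.1.contains v then p2 else (p2.1.insert v (depth + 1), p2.2 ++ [v])) (seen, accB) := by
        rw [List.foldl_cons]; congr 1; simp [hBtest]
      rw [stepA, stepB]
      exact ih dist seen accA accB (fun u hu => hn u (by simp [hu])) hC hK hKn hSn hSU hvals hcurr
    · -- fresh node: both sides insert (v, depth+1) and append v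
      have hnone : seen.get? v = none := (PySem.Dict.get?_eq_none_iff_not_mem_keys seen v).mpr hv
      have hgD : seen.getD v pvINF = pvINF := by rw [PySem.Dict.getD_eq_get?_getD, hnone]; rfl
      have hAtest : (dist.getD v pvINF == pvINF) = true := by rw [hgetDv, hgD]; simp
      have hBtest : seen.contains v = false := by
        rw [← Bool.not_eq_true]; intro h; exact hv ((PySem.Dict.contains_iff_mem_keys seen v).mp h)
      have hcurrmem : curr ∈ seen.keys := by
        by_contra h
        rw [(PySem.Dict.get?_eq_none_iff_not_mem_keys seen curr).mpr h] at hcurr; cases hcurr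
      have hcurrne : curr ≠ v := fun h => hv (h ▸ hcurrmem)
      have hdcurr : dist.getD curr pvINF = depth := by
        rw [PySem.Dict.getD_eq_get?_getD, hC curr (hSU curr hcurrmem),
          PySem.Dict.getD_eq_get?_getD, hcurr]; rfl
      have hd0 : 0 ≤ depth := (hvals curr depth hcurr).1
      have stepA : ((v :: nbrs).foldl (fun (p : pvDI × List Int) v =>
          if p.1.getD v pvINF == pvINF then
            (p.1.insert v (p.1.getD curr pvINF + 1), p.2 ++ [v])
          else p) (dist, accA)) = nbrs.foldl (fun (p : pvDI × List Int) v =>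
          if p.1.getD v pvINF == pvINF then
            (p.1.insert v (p.1.getD curr pvINF + 1), p.2 ++ [v])
          else p) (dist.insert v (depth + 1), accA ++ [v]) := by
        rw [List.foldl_cons]; congr 1; simp [hAtest, hdcurr]
      have stepB : ((v :: nbrs).foldl (fun (p2 : pvDI × List Int) v =>
          if p2.1.contains v then p2 else (p2.1.insert v (depth + 1), p2.2 ++ [v])) (seen, accB))
          = nbrs.foldl (fun (p2 : pvDI × List Int) v =>
          if p2.1.contains v then p2 else (p2.1.insert v (depth + 1), p2.2 ++ [v]))
          (seen.insert v (depth + 1), accB ++ [v]) := by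
        rw [List.foldl_cons]; congr 1; simp [hBtest]
      rw [stepA, stepB]
      -- re-established invariants for the tail
      have hC₁ : ∀ u ∈ pvU g, (dist.insert v (depth + 1)).get? u
          = some ((seen.insert v (depth + 1)).getD u pvINF) := by
        intro u hu
        by_cases h : u = v
        · subst h
          rw [PySem.Dict.get?_insert_self, PySem.Dict.getD_insert_self]
        · rw [PySem.Dict.get?_insert_of_ne _ _ h, PySem.Dict.getD_insert_of_ne _ _ _ h]
          exact hC u hu
      have hK₁ : ∀ k, k ∈ (dist.insert v (depth + 1)).keys ↔ k ∈ pvU g := by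
        intro k
        rw [PySem.Dict.mem_keys_insert]
        constructor
        · rintro (rfl | h); exact hvU; exact (hK k).mp h
        · intro h; by_cases hkv : k = v; exact Or.inl hkv; exact Or.inr ((hK k).mpr h)
      have hSU₁ : ∀ k ∈ (seen.insert v (depth + 1)).keys, k ∈ pvU g := by
        intro k hk
        rcases (PySem.Dict.mem_keys_insert _ _ _ _).mp hk with rfl | h
        · exact hvU
        · exact hSU k h
      have hvals₁ : ∀ k w, (seen.insert v (depth + 1)).get? k = some w → 0 ≤ w ∧ w ≤ depth + 1 := by
        intro k w hk
        by_cases h : k = v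
        · subst h; rw [PySem.Dict.get?_insert_self] at hk
          cases hk; omega
        · rw [PySem.Dict.get?_insert_of_ne _ _ h] at hk; exact hvals k w hk
      have hcurr₁ : (seen.insert v (depth + 1)).get? curr = some depth := by
        rw [PySem.Dict.get?_insert_of_ne _ _ hcurrne]; exact hcurr
      obtain ⟨dist', seen', Δ', hA, hB, hchar, hkeys, hSn', hΔn, hΔ, hC', hK', hKn', hsz⟩ :=
        ih (dist.insert v (depth + 1)) (seen.insert v (depth + 1)) (accA ++ [v]) (accB ++ [v])
          (fun u hu => hn u (by simp [hu])) hC₁ hK₁ (PySem.Dict.nodup_keys_insert _ _ _ hKn)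
          (PySem.Dict.nodup_keys_insert _ _ _ hSn) hSU₁ hvals₁ hcurr₁
      have hvΔ' : v ∉ Δ' := by
        intro h
        exact (hΔ v h).2 ((PySem.Dict.mem_keys_insert _ _ _ _).mpr (Or.inl rfl))
      refine ⟨dist', seen', v :: Δ', ?_, ?_, ?_, ?_, hSn', ?_, ?_, hC', hK', hKn', ?_⟩
      · rw [hA]; simp
      · rw [hB]; simp
      · intro k
        by_cases hk : k ∈ Δ'
        · rw [hchar k, if_pos hk, if_pos (by simp [hk])]
        · rw [hchar k, if_neg hk]
          by_cases hkv : k = v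
          · subst hkv
            rw [PySem.Dict.get?_insert_self, if_pos (by simp)]
          · rw [PySem.Dict.get?_insert_of_ne _ _ hkv, if_neg (by simp [hk, hkv])]
      · intro k
        rw [hkeys k, PySem.Dict.mem_keys_insert]
        simp only [List.mem_cons]
        tauto
      · simp only [List.nodup_cons]
        exact ⟨hvΔ', hΔn⟩
      · intro u hu
        rcases List.mem_cons.mp hu with rfl | h
        · exact ⟨hvU, hv⟩
        · refine ⟨(hΔ u h).1, fun hmem => (hΔ u h).2 ?_⟩
          exact (PySem.Dict.mem_keys_insert _ _ _ _).mpr (Or.inr hmem)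
      · rw [hsz, PySem.Dict.size_insert, if_neg (by simp [hBtest])]
        simp; omega


theorem pvBfsA_cons (g : pvDG) (fuel : Nat) (dist : pvDI) (curr : Int) (rest : List Int) :
    pvBfsA g (fuel + 1) dist (curr :: rest) =
      (fun s : pvDI × List Int => pvBfsA g fuel s.1 (rest ++ s.2))
        ((g.getD curr []).foldl
          (fun (p : pvDI × List Int) v =>
            if p.1.getD v pvINF == pvINF then
              (p.1.insert v (p.1.getD curr pvINF + 1), p.2 ++ [v])
            else p) (dist, ([] : List Int))) := rfl

theorem level_sim (g : pvDG) (depth : Int) (hINF : depth + 1 < pvINF)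
    (hnb : ∀ c : Int, ∀ v ∈ g.getD c [], v ∈ pvU g) (f : List Int) :
    ∀ (dist seen : pvDI) (qtail accB : List Int) (m : Nat),
    (∀ v ∈ pvU g, dist.get? v = some (seen.getD v pvINF)) →
    (∀ k, k ∈ dist.keys ↔ k ∈ pvU g) → dist.keys.Nodup →
    seen.keys.Nodup → (∀ k ∈ seen.keys, k ∈ pvU g) →
    (∀ k w, seen.get? k = some w → 0 ≤ w ∧ w ≤ depth + 1) →
    (∀ u ∈ f, seen.get? u = some depth) →
    ∃ (dist' seen' : pvDI) (Δ : List Int),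
      pvBfsA g (f.length + m) dist (f ++ qtail) = pvBfsA g m dist' (qtail ++ Δ)
      ∧ f.foldl (fun (p : pvDI × List Int) u =>
          (g.getD u []).foldl (fun (p2 : pvDI × List Int) v =>
            if p2.1.contains v then p2 else (p2.1.insert v (depth + 1), p2.2 ++ [v])) p)
          (seen, accB) = (seen', accB ++ Δ)
      ∧ (∀ k, seen'.get? k = if k ∈ Δ then some (depth + 1) else seen.get? k)
      ∧ (∀ k, k ∈ seen'.keys ↔ k ∈ seen.keys ∨ k ∈ Δ)
      ∧ seen'.keys.Nodup
      ∧ Δ.Nodup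
      ∧ (∀ v ∈ Δ, v ∈ pvU g ∧ v ∉ seen.keys)
      ∧ (∀ v ∈ pvU g, dist'.get? v = some (seen'.getD v pvINF))
      ∧ (∀ k, k ∈ dist'.keys ↔ k ∈ pvU g)
      ∧ dist'.keys.Nodup
      ∧ seen'.size = seen.size + Δ.length := by
  induction f with
  | nil =>
    intro dist seen qtail accB m hC hK hKn hSn hSU hvals hf
    exact ⟨dist, seen, [], by simp, by simp, by simp, by simp, hSn, by simp, by simp, hC, hK, hKn, by simp⟩
  | cons u f ih =>
    intro dist seen qtail accB m hC hK hKn hSn hSU hvals hf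
    have hu : seen.get? u = some depth := hf u (by simp)
    obtain ⟨dist₁, seen₁, δ, hA1, hB1, char1, keys1, sn1, δn, δp, C1, K1, Kn1, sz1⟩ :=
      inner_sim g depth hINF u (g.getD u []) dist seen [] accB (hnb u) hC hK hKn hSn hSU hvals hu
    have h0 : 0 ≤ depth := (hvals u depth hu).1
    have humem : u ∈ seen.keys := by
      by_contra h
      rw [(PySem.Dict.get?_eq_none_iff_not_mem_keys seen u).mpr h] at hu; cases hu
    -- invariants for the remaining frontier
    have SU1 : ∀ k ∈ seen₁.keys, k ∈ pvU g := by
      intro k hk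
      rcases (keys1 k).mp hk with h | h
      · exact hSU k h
      · exact (δp k h).1
    have vals1 : ∀ k w, seen₁.get? k = some w → 0 ≤ w ∧ w ≤ depth + 1 := by
      intro k w hk
      rw [char1 k] at hk
      by_cases h : k ∈ δ
      · rw [if_pos h] at hk; cases hk; omega
      · rw [if_neg h] at hk; exact hvals k w hk
    have hf1 : ∀ u' ∈ f, seen₁.get? u' = some depth := by
      intro u' hu'
      have hmem : u' ∈ seen.keys := by
        by_contra h
        have h2 := hf u' (by simp [hu'])
        rw [(PySem.Dict.get?_eq_none_iff_not_mem_keys seen u').mpr h] at h2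
        cases h2
      have : u' ∉ δ := fun h => (δp u' h).2 hmem
      rw [char1 u', if_neg this]
      exact hf u' (by simp [hu'])
    obtain ⟨dist', seen', Δ', hA2, hB2, char2, keys2, sn2, Δn2, Δp2, C2, K2, Kn2, sz2⟩ :=
      ih dist₁ seen₁ (qtail ++ δ) (accB ++ δ) m C1 K1 Kn1 sn1 SU1 vals1 hf1
    refine ⟨dist', seen', δ ++ Δ', ?_, ?_, ?_, ?_, sn2, ?_, ?_, C2, K2, Kn2, ?_⟩
    · have hlen : (u :: f).length + m = (f.length + m) + 1 := by simp; omega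
      rw [hlen]
      rw [show (u :: f) ++ qtail = u :: (f ++ qtail) from rfl]
      rw [pvBfsA_cons, hA1]
      simp only []
      rw [show (f ++ qtail) ++ ([] ++ δ) = f ++ (qtail ++ δ) from by simp]
      rw [hA2]
      simp [List.append_assoc]
    · rw [List.foldl_cons, hB1, hB2]
      simp [List.append_assoc]
    · intro k
      rw [char2 k]
      by_cases h2 : k ∈ Δ'
      · rw [if_pos h2, if_pos (by simp [h2])]
      · rw [if_neg h2, char1 k]
        by_cases h1 : k ∈ δ
        · rw [if_pos h1, if_pos (by simp [h1])]
        · rw [if_neg h1, if_neg (by simp [h1, h2])]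
    · intro k
      rw [keys2 k, keys1 k]
      simp only [List.mem_append]
      tauto
    · rw [List.nodup_append]
      refine ⟨δn, Δn2, ?_⟩
      intro x hx y hy hxy
      exact (Δp2 y hy).2 ((keys1 y).mpr (Or.inr (hxy ▸ hx)))
    · intro v hv
      rcases List.mem_append.mp hv with h | h
      · exact δp v h
      · refine ⟨(Δp2 v h).1, fun hmem => (Δp2 v h).2 ((keys1 v).mpr (Or.inl hmem))⟩
    · rw [sz2, sz1]
      simp; omega


theorem pvBfsB_cons (g : pvDG) (fuel : Nat) (seen : pvDI) (u : Int) (rest : List Int) (depth : Int) :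
    pvBfsB g (fuel + 1) seen (u :: rest) depth =
      (fun s : pvDI × List Int => pvBfsB g fuel s.1 s.2 (depth + 1))
        ((u :: rest).foldl
          (fun (p : pvDI × List Int) u =>
            (g.getD u []).foldl
              (fun (p2 : pvDI × List Int) v =>
                if p2.1.contains v then p2 else (p2.1.insert v (depth + 1), p2.2 ++ [v])) p)
          (seen, ([] : List Int))) := rfl

theorem main_sim (g : pvDG) (hnb : ∀ c : Int, ∀ v ∈ g.getD c [], v ∈ pvU g)
    (hUnd : (pvU g).Nodup) (hUlen : ((pvU g).length : Int) < pvINF) :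
    ∀ (k : Nat) (depth : Int) (dist seen : pvDI) (f : List Int) (m fb : Nat),
    (∀ v ∈ pvU g, dist.get? v = some (seen.getD v pvINF)) →
    (∀ kk, kk ∈ dist.keys ↔ kk ∈ pvU g) → dist.keys.Nodup →
    seen.keys.Nodup → (∀ kk ∈ seen.keys, kk ∈ pvU g) →
    (∀ kk w, seen.get? kk = some w → 0 ≤ w ∧ w ≤ depth) →
    (∀ u ∈ f, seen.get? u = some depth) →
    0 ≤ depth →
    (f ≠ [] → depth + 1 ≤ (seen.size : Int)) →
    (pvU g).length - seen.size ≤ k →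
    f.length + ((pvU g).length - seen.size) ≤ m →
    (pvU g).length - seen.size + 1 ≤ fb →
    (∀ v ∈ pvU g, (pvBfsA g m dist f).get? v = some ((pvBfsB g fb seen f depth).getD v pvINF))
    ∧ (∀ kk, kk ∈ (pvBfsA g m dist f).keys ↔ kk ∈ pvU g)
    ∧ (pvBfsA g m dist f).keys.Nodup := by
  intro k
  induction k using Nat.strong_induction_on with
  | _ k ih =>
    intro depth dist seen f m fb hC hK hKn hSn hSU hvals hf hd0 hdsize hk hm hfb
    cases f with
    | nil =>
      rw [pvBfsA_nil, pvBfsB_nil]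
      exact ⟨hC, hK, hKn⟩
    | cons u f =>
      have hds := hdsize (by simp)
      have hszle : seen.size ≤ (pvU g).length := by
        rw [size_eq_keys_length]
        exact length_le_of_nodup_subset _ _ hSn hUnd hSU
      have hINF : depth + 1 < pvINF := by
        have : (seen.size : Int) ≤ ((pvU g).length : Int) := by exact_mod_cast hszle
        omega
      obtain ⟨fb', rfl⟩ : ∃ fb', fb = fb' + 1 := ⟨fb - 1, by omega⟩
      obtain ⟨m', hmeq⟩ : ∃ m', m = (u :: f).length + m' := ⟨m - (u :: f).length, by simp at hm ⊢; omega⟩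
      have hvals' : ∀ kk w, seen.get? kk = some w → 0 ≤ w ∧ w ≤ depth + 1 := by
        intro kk w h; have := hvals kk w h; omega
      obtain ⟨dist', seen', Δ, hA, hB, char, keysI, sn', Δn, Δp, C', K', Kn', sz⟩ :=
        level_sim g depth hINF hnb (u :: f) dist seen [] [] m' hC hK hKn hSn hSU hvals' hf
      rw [List.append_nil] at hA
      have hBfsB : pvBfsB g (fb' + 1) seen (u :: f) depth = pvBfsB g fb' seen' Δ (depth + 1) := by
        rw [pvBfsB_cons, hB]; simp
      rw [hmeq, hA, hBfsB]
      simp only [List.nil_append]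
      cases Δ with
      | nil =>
        rw [pvBfsA_nil, pvBfsB_nil]
        exact ⟨C', K', Kn'⟩
      | cons δ0 Δ0 =>
        have hδ0 := Δp δ0 (by simp)
        have hlt : seen.size < (pvU g).length := by
          rw [size_eq_keys_length]
          exact length_lt_of_nodup_ssubset _ _ hSn hUnd hSU δ0 hδ0.1 hδ0.2
        have SU' : ∀ kk ∈ seen'.keys, kk ∈ pvU g := by
          intro kk hkk
          rcases (keysI kk).mp hkk with h | h
          · exact hSU kk h
          · exact (Δp kk h).1
        have hsz'le : seen'.size ≤ (pvU g).length := by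
          rw [size_eq_keys_length]
          exact length_le_of_nodup_subset _ _ sn' hUnd SU'
        have vals' : ∀ kk w, seen'.get? kk = some w → 0 ≤ w ∧ w ≤ depth + 1 := by
          intro kk w h
          rw [char kk] at h
          by_cases hkk : kk ∈ δ0 :: Δ0
          · rw [if_pos hkk] at h; cases h; omega
          · rw [if_neg hkk] at h; have := hvals kk w h; omega
        have hf' : ∀ u' ∈ δ0 :: Δ0, seen'.get? u' = some (depth + 1) := by
          intro u' hu'; rw [char u', if_pos hu']
        have hL : (δ0 :: Δ0).length = Δ0.length + 1 := by simp
        have hL2 : (u :: f).length = f.length + 1 := by simp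
        have hszI : (seen'.size : Int) = (seen.size : Int) + ((δ0 :: Δ0).length : Int) := by
          exact_mod_cast congrArg (fun n : Nat => (n : Int)) sz
        have hklt : k - 1 < k := by omega
        have hd1 : (0 : Int) ≤ depth + 1 := by omega
        have hdsz' : (δ0 :: Δ0) ≠ [] → depth + 1 + 1 ≤ (seen'.size : Int) := by
          intro _
          rw [hszI]
          push_cast [hL]
          omega
        have hk' : (pvU g).length - seen'.size ≤ k - 1 := by omega
        have hm' : (δ0 :: Δ0).length + ((pvU g).length - seen'.size) ≤ m' := by
          rw [hmeq] at hm
          omega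
        have hfb' : (pvU g).length - seen'.size + 1 ≤ fb' := by omega
        exact ih (k - 1) hklt (depth + 1) dist' seen' (δ0 :: Δ0) m' fb'
          C' K' Kn' sn' SU' vals' hf' hd1 hdsz' hk' hm' hfb'

-- ===== the ghost-dist trick: a dict certifying B-side invariants so level_sim applies without A =====

def pvMk (g : pvDG) (seen : pvDI) : pvDI :=
  (pvU g).foldl (fun d v => d.insert v (seen.getD v pvINF)) PySem.Dict.empty

theorem foldl_insert_get?_not_mem (L : List Int) (f : Int → Int) (d : pvDI) (k : Int)
    (h : k ∉ L) : (L.foldl (fun d x => d.insert x (f x)) d).get? k = d.get? k := by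
  induction L generalizing d with
  | nil => rfl
  | cons v L ih =>
    rw [List.foldl_cons, ih _ (fun hk => h (List.mem_cons_of_mem _ hk))]
    exact PySem.Dict.get?_insert_of_ne _ _ (fun hk : k = v => h (by simp [hk]))

theorem foldl_insert_get?_mem (L : List Int) (f : Int → Int) :
    ∀ (d : pvDI) (k : Int), L.Nodup → k ∈ L →
    (L.foldl (fun d x => d.insert x (f x)) d).get? k = some (f k) := by
  induction L with
  | nil => intro d k _ h; simp at h
  | cons v L ih =>
    intro d k hnd h
    rw [List.foldl_cons]
    rcases List.mem_cons.mp h with rfl | hk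
    · rw [foldl_insert_get?_not_mem _ _ _ _ (List.nodup_cons.mp hnd).1]
      exact PySem.Dict.get?_insert_self _ _ _
    · exact ih _ _ (List.nodup_cons.mp hnd).2 hk

theorem pvMk_get? (g : pvDG) (seen : pvDI) (v : Int) (h : v ∈ pvU g) :
    (pvMk g seen).get? v = some (seen.getD v pvINF) :=
  foldl_insert_get?_mem _ _ _ _ (nodup_pvU g) h

theorem pvMk_keys (g : pvDG) (seen : pvDI) (k : Int) :
    k ∈ (pvMk g seen).keys ↔ k ∈ pvU g := by
  unfold pvMk
  rw [PySem.Dict.keys_foldl_insert (pvU g) (fun _ v => seen.getD v pvINF) PySem.Dict.empty]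
  rw [PySem.Set.mem_update]
  simp [PySem.Dict.keys_empty]

theorem pvMk_nodup (g : pvDG) (seen : pvDI) : (pvMk g seen).keys.Nodup :=
  PySem.Dict.nodup_keys_foldl_insert _ _ _ PySem.Dict.nodup_keys_empty

-- one ghost round, without any A-side state
theorem round_sim (g : pvDG) (hnb : ∀ c : Int, ∀ v ∈ g.getD c [], v ∈ pvU g)
    (depth : Int) (hINF : depth + 1 < pvINF) (f : List Int) (seen : pvDI)
    (hSn : seen.keys.Nodup) (hSU : ∀ k ∈ seen.keys, k ∈ pvU g)
    (hvals : ∀ k w, seen.get? k = some w → 0 ≤ w ∧ w ≤ depth + 1)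
    (hf : ∀ u ∈ f, seen.get? u = some depth) :
    ∃ (seen' : pvDI) (Δ : List Int),
      f.foldl (fun (p : pvDI × List Int) u =>
          (g.getD u []).foldl (fun (p2 : pvDI × List Int) v =>
            if p2.1.contains v then p2 else (p2.1.insert v (depth + 1), p2.2 ++ [v])) p)
          (seen, ([] : List Int)) = (seen', Δ)
      ∧ (∀ k, seen'.get? k = if k ∈ Δ then some (depth + 1) else seen.get? k)
      ∧ (∀ k, k ∈ seen'.keys ↔ k ∈ seen.keys ∨ k ∈ Δ)
      ∧ seen'.keys.Nodup
      ∧ Δ.Nodup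
      ∧ (∀ v ∈ Δ, v ∈ pvU g ∧ v ∉ seen.keys)
      ∧ seen'.size = seen.size + Δ.length := by
  obtain ⟨dist', seen', Δ, _, hB, char, keysI, sn', Δn, Δp, _, _, _, sz⟩ :=
    level_sim g depth hINF hnb f (pvMk g seen) seen [] [] 0
      (fun v hv => pvMk_get? g seen v hv) (pvMk_keys g seen) (pvMk_nodup g seen)
      hSn hSU hvals hf
  rw [List.nil_append] at hB
  exact ⟨seen', Δ, hB, char, keysI, sn', Δn, Δp, sz⟩

-- running the ghost on: already-seen nodes keep their value, every newly seen node gets a value > depth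
theorem ghost_run (g : pvDG) (hnb : ∀ c : Int, ∀ v ∈ g.getD c [], v ∈ pvU g)
    (hUnd : (pvU g).Nodup) (hUlen : ((pvU g).length : Int) < pvINF) :
    ∀ (k : Nat) (depth : Int) (seen : pvDI) (f : List Int) (fb : Nat),
    seen.keys.Nodup → (∀ kk ∈ seen.keys, kk ∈ pvU g) →
    (∀ kk w, seen.get? kk = some w → 0 ≤ w ∧ w ≤ depth) →
    (∀ u ∈ f, seen.get? u = some depth) →
    0 ≤ depth →
    (f ≠ [] → depth + 1 ≤ (seen.size : Int)) →
    (pvU g).length - seen.size ≤ k →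
    (∀ kk ∈ seen.keys, (pvBfsB g fb seen f depth).get? kk = seen.get? kk)
    ∧ (∀ kk w, (pvBfsB g fb seen f depth).get? kk = some w → kk ∈ seen.keys ∨ depth + 1 ≤ w) := by
  intro k
  induction k using Nat.strong_induction_on with
  | _ k ih =>
    intro depth seen f fb hSn hSU hvals hf hd0 hdsize hk
    have base : (∀ kk ∈ seen.keys, seen.get? kk = seen.get? kk)
        ∧ (∀ kk w, seen.get? kk = some w → kk ∈ seen.keys ∨ depth + 1 ≤ w) := by
      refine ⟨fun _ _ => rfl, fun kk w h => Or.inl ?_⟩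
      by_contra hmem
      rw [(PySem.Dict.get?_eq_none_iff_not_mem_keys seen kk).mpr hmem] at h; cases h
    cases f with
    | nil => rw [pvBfsB_nil]; exact base
    | cons u f =>
      cases fb with
      | zero => exact base
      | succ fb' =>
        have hds := hdsize (by simp)
        have hszle : seen.size ≤ (pvU g).length := by
          rw [size_eq_keys_length]
          exact length_le_of_nodup_subset _ _ hSn hUnd hSU
        have hINF : depth + 1 < pvINF := by
          have : (seen.size : Int) ≤ ((pvU g).length : Int) := by exact_mod_cast hszle
          omega
        have hvals' : ∀ kk w, seen.get? kk = some w → 0 ≤ w ∧ w ≤ depth + 1 := by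
          intro kk w h; have := hvals kk w h; omega
        obtain ⟨seen', Δ, hB, char, keysI, sn', Δn, Δp, sz⟩ :=
          round_sim g hnb depth hINF (u :: f) seen hSn hSU hvals' hf
        have hstep : pvBfsB g (fb' + 1) seen (u :: f) depth = pvBfsB g fb' seen' Δ (depth + 1) := by
          rw [pvBfsB_cons, hB]
        rw [hstep]
        have SU' : ∀ kk ∈ seen'.keys, kk ∈ pvU g := by
          intro kk hkk
          rcases (keysI kk).mp hkk with h | h
          · exact hSU kk h
          · exact (Δp kk h).1
        have vals' : ∀ kk w, seen'.get? kk = some w → 0 ≤ w ∧ w ≤ depth + 1 := by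
          intro kk w h
          rw [char kk] at h
          by_cases hkk : kk ∈ Δ
          · rw [if_pos hkk] at h; cases h; omega
          · rw [if_neg hkk] at h; have := hvals kk w h; omega
        have hf' : ∀ u' ∈ Δ, seen'.get? u' = some (depth + 1) := by
          intro u' hu'; rw [char u', if_pos hu']
        have next : (∀ kk ∈ seen'.keys, (pvBfsB g fb' seen' Δ (depth + 1)).get? kk = seen'.get? kk)
            ∧ (∀ kk w, (pvBfsB g fb' seen' Δ (depth + 1)).get? kk = some w →
                kk ∈ seen'.keys ∨ depth + 2 ≤ w) := by
          cases Δ with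
          | nil =>
            rw [pvBfsB_nil]
            refine ⟨fun _ _ => rfl, fun kk w h => Or.inl ?_⟩
            by_contra hmem
            rw [(PySem.Dict.get?_eq_none_iff_not_mem_keys seen' kk).mpr hmem] at h; cases h
          | cons δ0 Δ0 =>
            have hδ0 := Δp δ0 (by simp)
            have hlt : seen.size < (pvU g).length := by
              rw [size_eq_keys_length]
              exact length_lt_of_nodup_ssubset _ _ hSn hUnd hSU δ0 hδ0.1 hδ0.2
            have hL : ((δ0 :: Δ0) : List Int).length = Δ0.length + 1 := by simp
            have hsz'le : seen'.size ≤ (pvU g).length := by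
              rw [size_eq_keys_length]
              exact length_le_of_nodup_subset _ _ sn' hUnd SU'
            have hszI : (seen'.size : Int) = (seen.size : Int) + (((δ0 :: Δ0) : List Int).length : Int) := by
              exact_mod_cast congrArg (fun n : Nat => (n : Int)) sz
            have hdsz' : ((δ0 :: Δ0) : List Int) ≠ [] → depth + 1 + 1 ≤ (seen'.size : Int) := by
              intro _
              rw [hszI]
              push_cast [hL]
              omega
            have hk' : (pvU g).length - seen'.size ≤ k - 1 := by omega
            have h21 := ih (k - 1) (by omega) (depth + 1) seen' (δ0 :: Δ0) fb' sn' SU' vals' hf'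
              (by omega) hdsz' hk'
            exact ⟨h21.1, fun kk w h => by
              rcases h21.2 kk w h with h' | h'
              · exact Or.inl h'
              · exact Or.inr (by omega)⟩
        refine ⟨?_, ?_⟩
        · intro kk hkk
          have hkkΔ : kk ∉ Δ := fun h => (Δp kk h).2 hkk
          have hkk' : kk ∈ seen'.keys := (keysI kk).mpr (Or.inl hkk)
          rw [next.1 kk hkk', char kk, if_neg hkkΔ]
        · intro kk w h
          rcases next.2 kk w h with h' | h'
          · rcases (keysI kk).mp h' with h'' | h''
            · exact Or.inl h''
            · -- newly discovered this round: its final value is depth + 1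
              have : (pvBfsB g fb' seen' Δ (depth + 1)).get? kk = seen'.get? kk :=
                next.1 kk ((keysI kk).mpr (Or.inr h''))
              rw [this, char kk, if_pos h''] at h
              cases h
              exact Or.inr (by omega)
          · exact Or.inr (by omega)

-- B's set-with-frontier round is the ghost round seen through Dict.keys
theorem pair_inner (depth : Int) (nbrs : List Int) :
    ∀ (d : pvDI) (acc : List Int),
    nbrs.foldl (fun (p2 : PySem.Set Int × List Int) v =>
        if PySem.Set.contains p2.1 v then p2 else (PySem.Set.add p2.1 v, p2.2 ++ [v]))
      (d.keys, acc)
    = ((nbrs.foldl (fun (p2 : pvDI × List Int) v =>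
          if p2.1.contains v then p2 else (p2.1.insert v (depth + 1), p2.2 ++ [v])) (d, acc)).1.keys,
       (nbrs.foldl (fun (p2 : pvDI × List Int) v =>
          if p2.1.contains v then p2 else (p2.1.insert v (depth + 1), p2.2 ++ [v])) (d, acc)).2) := by
  induction nbrs with
  | nil => intro d acc; rfl
  | cons v nbrs ih =>
    intro d acc
    by_cases hv : v ∈ d.keys
    · have h1 : PySem.Set.contains d.keys v = true := (PySem.Set.contains_iff _ _).mpr hv
      have h2 : d.contains v = true := (PySem.Dict.contains_iff_mem_keys _ _).mpr hv
      rw [List.foldl_cons, List.foldl_cons]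
      rw [if_pos h1, if_pos h2]
      exact ih d acc
    · have h1 : PySem.Set.contains d.keys v = false := by
        rw [← Bool.not_eq_true]; intro h; exact hv ((PySem.Set.contains_iff _ _).mp h)
      have h2 : d.contains v = false := by
        rw [← Bool.not_eq_true]; intro h; exact hv ((PySem.Dict.contains_iff_mem_keys _ _).mp h)
      rw [List.foldl_cons, List.foldl_cons]
      rw [if_neg (by simpa using hv), if_neg (by simp [h2])]
      have hadd : PySem.Set.add d.keys v = d.keys ++ [v] := by
        unfold PySem.Set.add
        rw [h1]
        simp
      have hkeys : (d.insert v (depth + 1)).keys = d.keys ++ [v] :=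
        PySem.Dict.keys_insert_of_not_contains _ _ h2
      rw [hadd, ← hkeys]
      exact ih (d.insert v (depth + 1)) (acc ++ [v])

theorem pair_outer (g : pvDG) (depth : Int) (f : List Int) :
    ∀ (d : pvDI) (acc : List Int),
    f.foldl (fun (p : PySem.Set Int × List Int) u' =>
        (g.getD u' []).foldl (fun (p2 : PySem.Set Int × List Int) v =>
          if PySem.Set.contains p2.1 v then p2 else (PySem.Set.add p2.1 v, p2.2 ++ [v])) p)
      (d.keys, acc)
    = ((f.foldl (fun (p : pvDI × List Int) u =>
          (g.getD u []).foldl (fun (p2 : pvDI × List Int) v =>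
            if p2.1.contains v then p2 else (p2.1.insert v (depth + 1), p2.2 ++ [v])) p) (d, acc)).1.keys,
       (f.foldl (fun (p : pvDI × List Int) u =>
          (g.getD u []).foldl (fun (p2 : pvDI × List Int) v =>
            if p2.1.contains v then p2 else (p2.1.insert v (depth + 1), p2.2 ++ [v])) p) (d, acc)).2) := by
  induction f with
  | nil => intro d acc; rfl
  | cons u f ih =>
    intro d acc
    rw [List.foldl_cons, List.foldl_cons]
    rw [pair_inner depth (g.getD u []) d acc]
    exact ih _ _

-- counting helpers
theorem countP_mem_keys (U keys : List Int) (hU : U.Nodup) (hk : keys.Nodup)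
    (hsub : ∀ x ∈ keys, x ∈ U) :
    U.countP (fun v => decide (v ∈ keys)) = keys.length := by
  rw [List.countP_eq_length_filter]
  have hperm : (U.filter (fun v => decide (v ∈ keys))).Perm keys := by
    apply (List.perm_ext_iff_of_nodup (List.Nodup.filter _ hU) hk).mpr
    intro a
    simp only [List.mem_filter, decide_eq_true_eq]
    exact ⟨fun h => h.2, fun h => ⟨hsub a h, h⟩⟩
  exact hperm.length_eq

theorem countP_not_add (l : List Int) (p : Int → Bool) :
    l.countP p + l.countP (fun a => !(p a)) = l.length := by
  induction l with
  | nil => simp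
  | cons a l ih =>
    by_cases h : p a = true <;> simp [h] <;> omega

theorem count_le_ttl (g : pvDG) (ttl : Int) (httl : ttl < pvINF) (seen : pvDI)
    (hSn : seen.keys.Nodup) (hSU : ∀ k ∈ seen.keys, k ∈ pvU g)
    (hval : ∀ k ∈ seen.keys, ∃ w, seen.get? k = some w ∧ w ≤ ttl) :
    (pvU g).countP (fun v => decide (seen.getD v pvINF ≤ ttl)) = seen.keys.length := by
  have hcong := List.countP_congr (l := pvU g)
    (p := fun v => decide (seen.getD v pvINF ≤ ttl)) (q := fun v => decide (v ∈ seen.keys))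
    (by
      intro x _
      by_cases hx : x ∈ seen.keys
      · obtain ⟨w, hw, hwt⟩ := hval x hx
        simp [PySem.Dict.getD_eq_get?_getD, hw, hx, hwt]
      · have : seen.get? x = none := (PySem.Dict.get?_eq_none_iff_not_mem_keys seen x).mpr hx
        simp [PySem.Dict.getD_eq_get?_getD, this, hx]
        unfold pvINF at httl ⊢
        omega)
  rw [hcong]
  exact countP_mem_keys _ _ (nodup_pvU g) hSn hSU

-- the capped co-simulation: the ghost's final ≤-TTL count is the size of B's within-set
theorem capped_sim (g : pvDG) (hnb : ∀ c : Int, ∀ v ∈ g.getD c [], v ∈ pvU g)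
    (hUnd : (pvU g).Nodup) (hUlen : ((pvU g).length : Int) < pvINF) :
    ∀ (k : Nat) (depth ttl : Int) (seen : pvDI) (f : List Int) (fb fuel : Nat),
    seen.keys.Nodup → (∀ kk ∈ seen.keys, kk ∈ pvU g) →
    (∀ kk w, seen.get? kk = some w → 0 ≤ w ∧ w ≤ depth) →
    (∀ u ∈ f, seen.get? u = some depth) →
    0 ≤ depth → depth ≤ ttl → ttl < pvINF →
    (f ≠ [] → depth + 1 ≤ (seen.size : Int)) →
    (pvU g).length - seen.size ≤ k →
    (pvU g).length - seen.size + 1 ≤ fuel →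
    (pvU g).length - seen.size + 1 ≤ fb →
    (pvU g).countP (fun v => decide ((pvBfsB g fb seen f depth).getD v pvINF ≤ ttl))
      = (pvWithin g ttl fuel seen.keys f depth).length := by
  intro k
  induction k using Nat.strong_induction_on with
  | _ k ih =>
    intro depth ttl seen f fb fuel hSn hSU hvals hf hd0 hdttl httl hdsize hk hfuel hfb
    cases f with
    | nil =>
      rw [pvBfsB_nil, pvWithin_nil]
      exact count_le_ttl g ttl httl seen hSn hSU (by
        intro kk hkk
        cases h : seen.get? kk with
        | none =>
          exact absurd ((PySem.Dict.get?_eq_none_iff_not_mem_keys seen kk).mp h) (by simp [hkk])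
        | some w => exact ⟨w, rfl, by have := hvals kk w h; omega⟩)
    | cons u f =>
      obtain ⟨fuel', rfl⟩ : ∃ fuel', fuel = fuel' + 1 := ⟨fuel - 1, by omega⟩
      have hds := hdsize (by simp)
      have hszle : seen.size ≤ (pvU g).length := by
        rw [size_eq_keys_length]
        exact length_le_of_nodup_subset _ _ hSn hUnd hSU
      have hINF : depth + 1 < pvINF := by
        have : (seen.size : Int) ≤ ((pvU g).length : Int) := by exact_mod_cast hszle
        omega
      by_cases hlt : depth < ttl
      · -- both sides advance one level
        obtain ⟨fb', rfl⟩ : ∃ fb', fb = fb' + 1 := ⟨fb - 1, by omega⟩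
        have hvals' : ∀ kk w, seen.get? kk = some w → 0 ≤ w ∧ w ≤ depth + 1 := by
          intro kk w h; have := hvals kk w h; omega
        obtain ⟨seen', Δ, hB, char, keysI, sn', Δn, Δp, sz⟩ :=
          round_sim g hnb depth hINF (u :: f) seen hSn hSU hvals' hf
        have hstep : pvBfsB g (fb' + 1) seen (u :: f) depth = pvBfsB g fb' seen' Δ (depth + 1) := by
          rw [pvBfsB_cons, hB]
        have hWstep : pvWithin g ttl (fuel' + 1) seen.keys (u :: f) depth
            = pvWithin g ttl fuel' seen'.keys Δ (depth + 1) := by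
          rw [pvWithin_cons, if_pos hlt]
          have hp := pair_outer g depth (u :: f) seen []
          rw [hB] at hp
          rw [hp]
        rw [hstep, hWstep]
        have SU' : ∀ kk ∈ seen'.keys, kk ∈ pvU g := by
          intro kk hkk
          rcases (keysI kk).mp hkk with h | h
          · exact hSU kk h
          · exact (Δp kk h).1
        have vals' : ∀ kk w, seen'.get? kk = some w → 0 ≤ w ∧ w ≤ depth + 1 := by
          intro kk w h
          rw [char kk] at h
          by_cases hkk : kk ∈ Δ
          · rw [if_pos hkk] at h; cases h; omega
          · rw [if_neg hkk] at h; have := hvals kk w h; omega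
        have hf' : ∀ u' ∈ Δ, seen'.get? u' = some (depth + 1) := by
          intro u' hu'; rw [char u', if_pos hu']
        cases Δ with
        | nil =>
          rw [pvBfsB_nil, pvWithin_nil]
          exact count_le_ttl g ttl httl seen' sn' SU' (by
            intro kk hkk
            cases h : seen'.get? kk with
            | none =>
              exact absurd ((PySem.Dict.get?_eq_none_iff_not_mem_keys seen' kk).mp h) (by simp [hkk])
            | some w => exact ⟨w, rfl, by have := vals' kk w h; omega⟩)
        | cons δ0 Δ0 =>
          have hδ0 := Δp δ0 (by simp)
          have hlt2 : seen.size < (pvU g).length := by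
            rw [size_eq_keys_length]
            exact length_lt_of_nodup_ssubset _ _ hSn hUnd hSU δ0 hδ0.1 hδ0.2
          have hL : ((δ0 :: Δ0) : List Int).length = Δ0.length + 1 := by simp
          have hsz'le : seen'.size ≤ (pvU g).length := by
            rw [size_eq_keys_length]
            exact length_le_of_nodup_subset _ _ sn' hUnd SU'
          have hszI : (seen'.size : Int) = (seen.size : Int) + (((δ0 :: Δ0) : List Int).length : Int) := by
            exact_mod_cast congrArg (fun n : Nat => (n : Int)) sz
          have hdsz' : ((δ0 :: Δ0) : List Int) ≠ [] → depth + 1 + 1 ≤ (seen'.size : Int) := by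
            intro _
            rw [hszI]
            push_cast [hL]
            omega
          exact ih (k - 1) (by omega) (depth + 1) ttl seen' (δ0 :: Δ0) fb' fuel'
            sn' SU' vals' hf' (by omega) (by omega) httl hdsz' (by omega) (by omega) (by omega)
      · -- B's depth limit reached: B stops; the ghost runs on, but every later value exceeds ttl
        have hWstop : pvWithin g ttl (fuel' + 1) seen.keys (u :: f) depth = seen.keys := by
          rw [pvWithin_cons, if_neg hlt]
        rw [hWstop]
        obtain ⟨hold, hnew⟩ := ghost_run g hnb hUnd hUlen k depth seen (u :: f) fb
          hSn hSU hvals hf hd0 hdsize hk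
        have hcong := List.countP_congr (l := pvU g)
          (p := fun v => decide ((pvBfsB g fb seen (u :: f) depth).getD v pvINF ≤ ttl))
          (q := fun v => decide (v ∈ seen.keys))
          (by
            intro x _
            by_cases hx : x ∈ seen.keys
            · obtain ⟨w, hw⟩ : ∃ w, seen.get? x = some w := by
                cases h : seen.get? x with
                | none =>
                  exact absurd ((PySem.Dict.get?_eq_none_iff_not_mem_keys seen x).mp h) (by simp [hx])
                | some w => exact ⟨w, rfl⟩
              have hb := hvals x w hw
              have : (pvBfsB g fb seen (u :: f) depth).get? x = some w := by
                rw [hold x hx, hw]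
              simp [PySem.Dict.getD_eq_get?_getD, this, hx]
              omega
            · cases h : (pvBfsB g fb seen (u :: f) depth).get? x with
              | none =>
                simp [PySem.Dict.getD_eq_get?_getD, h, hx]
                unfold pvINF at httl ⊢
                omega
              | some w =>
                rcases hnew x w h with h' | h'
                · exact absurd h' hx
                · simp [PySem.Dict.getD_eq_get?_getD, h, hx]
                  omega)
        rw [hcong]
        exact countP_mem_keys _ _ (nodup_pvU g) hSn hSU

theorem length_le_of_nodup_subset' (l u : List Int) (hl : l.Nodup)
    (hs : ∀ x ∈ l, x ∈ u) : l.length ≤ u.length := by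
  rw [← List.toFinset_card_of_nodup hl]
  calc l.toFinset.card ≤ u.toFinset.card := by
        apply Finset.card_le_card
        intro x hx
        simp only [List.mem_toFinset] at *
        exact hs x hx
    _ ≤ u.length := u.toFinset_card_le

theorem sum_ite_eq_countP (L : List Int) (P : Int → Prop) [DecidablePred P] :
    (L.map (fun k => if P k then (1 : Int) else 0)).sum
      = (L.countP (fun k => decide (P k)) : Int) := by
  rw [← PySem.List.sum_map_ite_one_zero (fun k => decide (P k)) L]
  congr 1
  apply List.map_congr_left
  intro k _
  by_cases h : P k <;> simp [h]

theorem ofList_items_subset (l : List (Int × List Int)) :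
    ∀ p ∈ (PySem.Dict.ofList l).items, p ∈ l := by
  have gen : ∀ (l : List (Int × List Int)) (d : PySem.Dict Int (List Int)),
      ∀ p ∈ (l.foldl (fun d kv => d.insert kv.1 kv.2) d).items, p ∈ d.items ∨ p ∈ l := by
    intro l
    induction l with
    | nil => intro d p hp; exact Or.inl hp
    | cons kv l ih =>
      intro d p hp
      rw [List.foldl_cons] at hp
      rcases ih (d.insert kv.1 kv.2) p hp with h | h
      · rcases (PySem.Dict.mem_items_insert _ _ _ _).mp h with h' | h'
        · exact Or.inr (by simp [h'])
        · exact Or.inl h'.1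
      · exact Or.inr (by simp [h])
  intro p hp
  rcases gen l PySem.Dict.empty p hp with h | h
  · simp [PySem.Dict.empty] at h
  · exact h

theorem pvU_len_bound (l : List (Int × List Int))
    (h : l.length + ((l.map (fun kv => kv.2.length)).sum) < 2147483648) :
    ((pvU (PySem.Dict.ofList l)).length : Int) < pvINF := by
  have h1 : (pvU (PySem.Dict.ofList l)).length ≤ (pvM (PySem.Dict.ofList l)).length :=
    length_le_of_nodup_subset' _ _ (nodup_pvU _) (fun x hx => (mem_pvU_iff _ x).mp hx)
  have h2 : (pvM (PySem.Dict.ofList l)).length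
      = ((PySem.Dict.ofList l).items.map (fun kv => kv.2.length + 1)).sum := by
    unfold pvM
    rw [List.length_flatMap]
    congr 1
  have hnd : (PySem.Dict.ofList l).items.Nodup :=
    List.Nodup.of_map _ (PySem.Dict.nodup_keys_ofList l)
  have hmul : (↑((PySem.Dict.ofList l).items) : Multiset (Int × List Int)) ≤ ↑l :=
    (Multiset.le_iff_subset (by exact hnd)).mpr
      (by intro a ha; exact ofList_items_subset l a (by simpa using ha))
  have h3 : ((PySem.Dict.ofList l).items.map (fun kv => kv.2.length + 1)).sum
      ≤ (l.map (fun kv => kv.2.length + 1)).sum := by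
    have hmap := Multiset.map_le_map (f := fun kv : Int × List Int => kv.2.length + 1) hmul
    obtain ⟨u, hu⟩ := Multiset.le_iff_exists_add.mp hmap
    have hs : (Multiset.map (fun kv : Int × List Int => kv.2.length + 1)
          (↑((PySem.Dict.ofList l).items))).sum
        ≤ (Multiset.map (fun kv : Int × List Int => kv.2.length + 1) (↑l)).sum := by
      rw [hu, Multiset.sum_add]
      exact Nat.le_add_right _ _
    simpa using hs
  have h4 : (l.map (fun kv => kv.2.length + 1)).sum
      = (l.map (fun kv => kv.2.length)).sum + l.length := by
    induction l with
    | nil => simp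
    | cons kv l ih => simp; omega
  unfold pvINF
  have : (pvU (PySem.Dict.ofList l)).length < 2147483648 := by omega
  exact_mod_cast this

-- per-query simulation: A's counter equals |universe| - |B's within-TTL set|
theorem query_sim (g : pvDG) (hlenU : ((pvU g).length : Int) < pvINF)
    (hnbU : ∀ c : Int, ∀ v ∈ g.getD c [], v ∈ pvU g)
    (dist0 : pvDI) (h0U : ∀ k ∈ dist0.keys, k ∈ pvU g) (h0n : dist0.keys.Nodup)
    (src ttl : Int) (hsrc : src ∈ g.keys) (httl : ttl < pvINF) :
    ((pvBfsA g (2 * ((pvInit g dist0).insert src 0).size + 2) ((pvInit g dist0).insert src 0) [src]).items.map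
        (fun kv => if kv.2 > ttl then (1 : Int) else 0)).sum
      = ((pvU g).length : Int) -
        (((if 0 ≤ ttl then pvWithin g ttl ((pvU g).length + 2) (PySem.Set.ofList [src]) [src] 0
           else PySem.Set.ofList []).length : Nat) : Int)
    ∧ (∀ k, k ∈ (pvBfsA g (2 * ((pvInit g dist0).insert src 0).size + 2) ((pvInit g dist0).insert src 0) [src]).keys ↔ k ∈ pvU g)
    ∧ (pvBfsA g (2 * ((pvInit g dist0).insert src 0).size + 2) ((pvInit g dist0).insert src 0) [src]).keys.Nodup := by
  have hsrcU : src ∈ pvU g := keys_mem_pvU g src hsrc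
  have hIflat := pvInit_eq_flat g dist0
  -- keys of d1
  have hd1keys : ∀ k, k ∈ ((pvInit g dist0).insert src 0).keys ↔ k ∈ pvU g := by
    intro k
    rw [PySem.Dict.mem_keys_insert, hIflat, insINF_mem_keys]
    constructor
    · rintro (rfl | h | h)
      · exact hsrcU
      · exact h0U k h
      · exact (mem_pvU_iff g k).mpr h
    · intro h
      exact Or.inr (Or.inr ((mem_pvU_iff g k).mp h))
  have hd1n : ((pvInit g dist0).insert src 0).keys.Nodup := by
    apply PySem.Dict.nodup_keys_insert
    rw [hIflat]
    exact insINF_nodup _ _ h0n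
  -- seen0 facts
  have hs0get : ∀ k : Int, (PySem.Dict.empty.insert src 0 : pvDI).get? k
      = if k = src then some 0 else none := by
    intro k
    by_cases h : k = src
    · subst h; rw [PySem.Dict.get?_insert_self, if_pos rfl]
    · rw [PySem.Dict.get?_insert_of_ne _ _ h, if_neg h]
      exact PySem.Dict.get?_empty k
  have hC0 : ∀ v ∈ pvU g, ((pvInit g dist0).insert src 0).get? v
      = some ((PySem.Dict.empty.insert src 0 : pvDI).getD v pvINF) := by
    intro v hv
    rw [PySem.Dict.getD_eq_get?_getD, hs0get v]
    by_cases h : v = src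
    · subst h
      rw [PySem.Dict.get?_insert_self, if_pos rfl]
      rfl
    · rw [PySem.Dict.get?_insert_of_ne _ _ h, if_neg h, hIflat,
        insINF_get?_mem _ _ _ ((mem_pvU_iff g v).mp hv)]
      rfl
  have hs0n : (PySem.Dict.empty.insert src 0 : pvDI).keys.Nodup :=
    PySem.Dict.nodup_keys_insert _ _ _ PySem.Dict.nodup_keys_empty
  have hs0U : ∀ k ∈ (PySem.Dict.empty.insert src 0 : pvDI).keys, k ∈ pvU g := by
    intro k hk
    rcases (PySem.Dict.mem_keys_insert _ _ _ _).mp hk with rfl | h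
    · exact hsrcU
    · rw [PySem.Dict.keys_empty] at h
      cases h
  have hs0vals : ∀ k w, (PySem.Dict.empty.insert src 0 : pvDI).get? k = some w → 0 ≤ w ∧ w ≤ 0 := by
    intro k w hk
    rw [hs0get k] at hk
    by_cases h : k = src
    · rw [if_pos h] at hk; cases hk; omega
    · rw [if_neg h] at hk; cases hk
  have hs0size : (PySem.Dict.empty.insert src 0 : pvDI).size = 1 := by
    rw [PySem.Dict.size_insert]
    have : (PySem.Dict.empty : pvDI).contains src = false := by
      rw [← Bool.not_eq_true]
      intro hcon
      have := (PySem.Dict.contains_iff_mem_keys _ _).mp hcon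
      rw [PySem.Dict.keys_empty] at this
      cases this
    rw [if_neg (by simp [this]), PySem.Dict.size_empty]
  have hs0keys : (PySem.Dict.empty.insert src 0 : pvDI).keys = [src] := by
    rw [PySem.Dict.keys_insert_of_not_contains _ _ (by
      rw [← Bool.not_eq_true]
      intro hcon
      have := (PySem.Dict.contains_iff_mem_keys _ _).mp hcon
      rw [PySem.Dict.keys_empty] at this
      cases this)]
    simp [PySem.Dict.keys_empty]
  have hofL : PySem.Set.ofList [src] = [src] := by
    show PySem.Set.add (PySem.Set.ofList []) src = [src]
    unfold PySem.Set.add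
    simp [PySem.Set.ofList]
  have hd1size : ((pvInit g dist0).insert src 0).size = (pvU g).length := by
    rw [size_eq_keys_length]
    exact ((List.perm_ext_iff_of_nodup hd1n (nodup_pvU g)).mpr hd1keys).length_eq
  have hUpos : 1 ≤ (pvU g).length :=
    List.length_pos_of_mem hsrcU
  have hf0 : ∀ u ∈ ([src] : List Int), (PySem.Dict.empty.insert src 0 : pvDI).get? u = some 0 := by
    intro u hu; rcases List.mem_singleton.mp hu with rfl; rw [hs0get, if_pos rfl]
  obtain ⟨CF, KF, KnF⟩ := main_sim g hnbU (nodup_pvU g) hlenU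
    ((pvU g).length) 0 ((pvInit g dist0).insert src 0) (PySem.Dict.empty.insert src 0) [src]
    (2 * ((pvInit g dist0).insert src 0).size + 2) ((pvU g).length + 2)
    hC0 hd1keys hd1n hs0n hs0U hs0vals hf0
    le_rfl
    (by intro _; rw [hs0size]; norm_num)
    (by omega)
    (by rw [hd1size, hs0size]; simp; omega)
    (by rw [hs0size]; omega)
  refine ⟨?_, KF, KnF⟩
  -- A's counter as a countP over the universe, against the ghost's final values
  rw [PySem.Dict.items_eq_map_keys _ KnF pvINF, List.map_map]
  have hcomp : ((fun kv : Int × Int => if kv.2 > ttl then (1 : Int) else 0) ∘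
      (fun k => (k, (pvBfsA g (2 * ((pvInit g dist0).insert src 0).size + 2) ((pvInit g dist0).insert src 0) [src]).getD k pvINF)))
      = fun k => if (pvBfsA g (2 * ((pvInit g dist0).insert src 0).size + 2) ((pvInit g dist0).insert src 0) [src]).getD k pvINF > ttl then (1 : Int) else 0 := rfl
  rw [hcomp, sum_ite_eq_countP]
  have hcong := List.countP_congr (l := (pvBfsA g (2 * ((pvInit g dist0).insert src 0).size + 2) ((pvInit g dist0).insert src 0) [src]).keys)
    (p := fun k => decide ((pvBfsA g (2 * ((pvInit g dist0).insert src 0).size + 2) ((pvInit g dist0).insert src 0) [src]).getD k pvINF > ttl))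
    (q := fun k => decide ((pvBfsB g ((pvU g).length + 2) (PySem.Dict.empty.insert src 0) [src] 0).getD k pvINF > ttl))
    (by
      intro x hx
      have hxU := (KF x).mp hx
      simp [PySem.Dict.getD_eq_get?_getD, CF x hxU])
  rw [hcong]
  have hperm : (pvBfsA g (2 * ((pvInit g dist0).insert src 0).size + 2) ((pvInit g dist0).insert src 0) [src]).keys.Perm (pvU g) :=
    (List.perm_ext_iff_of_nodup KnF (nodup_pvU g)).mpr KF
  rw [hperm.countP_eq]
  -- now split on the sign of ttl
  by_cases h0t : 0 ≤ ttl
  · rw [if_pos h0t]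
    have hcap := capped_sim g hnbU (nodup_pvU g) hlenU
      ((pvU g).length) 0 ttl (PySem.Dict.empty.insert src 0) [src]
      ((pvU g).length + 2) ((pvU g).length + 2)
      hs0n hs0U hs0vals hf0 le_rfl h0t httl
      (by intro _; rw [hs0size]; norm_num)
      (by rw [hs0size]; omega)
      (by rw [hs0size]; omega)
      (by rw [hs0size]; omega)
    rw [hs0keys] at hcap
    rw [hofL]
    rw [← hcap]
    have hsum := countP_not_add (pvU g)
      (fun v => decide ((pvBfsB g ((pvU g).length + 2) (PySem.Dict.empty.insert src 0) [src] 0).getD v pvINF ≤ ttl))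
    have hpt : (pvU g).countP
        (fun v => decide ((pvBfsB g ((pvU g).length + 2) (PySem.Dict.empty.insert src 0) [src] 0).getD v pvINF > ttl))
        = (pvU g).countP
        (fun v => !(decide ((pvBfsB g ((pvU g).length + 2) (PySem.Dict.empty.insert src 0) [src] 0).getD v pvINF ≤ ttl))) := by
      apply List.countP_congr
      intro x _
      by_cases h : (pvBfsB g ((pvU g).length + 2) (PySem.Dict.empty.insert src 0) [src] 0).getD x pvINF ≤ ttl
      · have h2 : ¬ ((pvBfsB g ((pvU g).length + 2) (PySem.Dict.empty.insert src 0) [src] 0).getD x pvINF > ttl) := by omega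
        simp [h, h2]
      · have h2 : (pvBfsB g ((pvU g).length + 2) (PySem.Dict.empty.insert src 0) [src] 0).getD x pvINF > ttl := by omega
        simp [h, h2]
    rw [hpt]
    omega
  · rw [if_neg h0t]
    have hneg : ttl < 0 := by omega
    obtain ⟨hold, hnew⟩ := ghost_run g hnbU (nodup_pvU g) hlenU
      ((pvU g).length) 0 (PySem.Dict.empty.insert src 0) [src] ((pvU g).length + 2)
      hs0n hs0U hs0vals hf0 le_rfl
      (by intro _; rw [hs0size]; norm_num)
      (by rw [hs0size]; omega)
    have hall : (pvU g).countP
        (fun v => decide ((pvBfsB g ((pvU g).length + 2) (PySem.Dict.empty.insert src 0) [src] 0).getD v pvINF > ttl))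
        = (pvU g).length := by
      have hT : (pvU g).countP
          (fun v => decide ((pvBfsB g ((pvU g).length + 2) (PySem.Dict.empty.insert src 0) [src] 0).getD v pvINF > ttl))
          = (pvU g).countP (fun _ => true) := by
        apply List.countP_congr
        intro x _
        simp only [decide_eq_true_eq, iff_true]
        cases h : (pvBfsB g ((pvU g).length + 2) (PySem.Dict.empty.insert src 0) [src] 0).get? x with
        | none =>
          rw [PySem.Dict.getD_eq_get?_getD, h]
          show ttl < pvINF
          omega
        | some w =>
          rw [PySem.Dict.getD_eq_get?_getD, h]
          show ttl < w
          rcases hnew x w h with h' | h'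
          · rw [hs0keys] at h'
            rcases List.mem_singleton.mp h' with rfl
            have : (pvBfsB g ((pvU g).length + 2) (PySem.Dict.empty.insert x 0) [x] 0).get? x
                = (PySem.Dict.empty.insert x 0 : pvDI).get? x := hold x (by rw [hs0keys]; simp)
            rw [this, PySem.Dict.get?_insert_self] at h
            cases h
            omega
          · omega
      rw [hT]
      simp
    rw [hall]
    simp [PySem.Set.ofList]

-- fold across the queries: A threads its dist dict, B maps each query independently
def pvQB (g : pvDG) (q : List Int) : String :=
  let src := PySem.List.pyGetD q 0 0
  let ttl := PySem.List.pyGetD q 1 0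
  let within : PySem.Set Int :=
    if 0 ≤ ttl then pvWithin g ttl ((pvU g).length + 2) (PySem.Set.ofList [src]) [src] 0
    else PySem.Set.ofList []
  pvLine (((pvU g).length : Int) - (within.length : Int)) src ttl

theorem fold_sim (g : pvDG) (hlenU : ((pvU g).length : Int) < pvINF)
    (hnbU : ∀ c : Int, ∀ v ∈ g.getD c [], v ∈ pvU g) :
    ∀ (dest : List (List Int)) (dist0 : pvDI) (acc : List String),
    (∀ k ∈ dist0.keys, k ∈ pvU g) → dist0.keys.Nodup →
    (∀ q ∈ dest, g.contains (PySem.List.pyGetD q 0 0) = true ∧ PySem.List.pyGetD q 1 0 < 2147483648) →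
    (dest.foldl
      (fun (st : pvDI × List String) d =>
        let start := PySem.List.pyGetD d 0 0
        let ttl := PySem.List.pyGetD d 1 0
        let d1 := (pvInit g st.1).insert start 0
        let dist := pvBfsA g (2 * d1.size + 2) d1 [start]
        let counter := (dist.items.map (fun kv => if kv.2 > ttl then (1 : Int) else 0)).sum
        (dist, st.2 ++ [pvLine counter start ttl]))
      (dist0, acc)).2
    = acc ++ dest.map (fun query => pvQB g query) := by
  intro dest
  induction dest with
  | nil => intro dist0 acc _ _ _; simp
  | cons q dest ih =>
    intro dist0 acc h0U h0n hq
    have hsrc : PySem.List.pyGetD q 0 0 ∈ g.keys :=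
      (PySem.Dict.contains_iff_mem_keys _ _).mp (hq q (by simp)).1
    have httl : PySem.List.pyGetD q 1 0 < pvINF := (hq q (by simp)).2
    obtain ⟨hcnt, hK, hKn⟩ := query_sim g hlenU hnbU dist0 h0U h0n
      (PySem.List.pyGetD q 0 0) (PySem.List.pyGetD q 1 0) hsrc httl
    rw [List.foldl_cons]
    rw [ih _ _ (fun k hk => (hK k).mp hk) hKn (fun q' hq' => hq q' (by simp [hq']))]
    have hline : pvLine ((pvBfsA g (2 * ((pvInit g dist0).insert (PySem.List.pyGetD q 0 0) 0).size + 2)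
          ((pvInit g dist0).insert (PySem.List.pyGetD q 0 0) 0) [PySem.List.pyGetD q 0 0]).items.map
            (fun kv => if kv.2 > PySem.List.pyGetD q 1 0 then (1 : Int) else 0)).sum
          (PySem.List.pyGetD q 0 0) (PySem.List.pyGetD q 1 0)
        = pvQB g q := by
      rw [hcnt]
      rfl
    rw [List.map_cons, ← hline]
    simp

-- ===== VERDICT (by name: the statement is the Claim_ definition above) =====
theorem solve_spec : Claim_equal_solve := by
  intro par _hdom hpre
  obtain ⟨hq, hnb, hlen⟩ := hpre
  unfold Spec_solve solve solve_alt
  dsimp only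
  apply congrArg
  have hnbU : ∀ c : Int, ∀ v ∈ (PySem.Dict.ofList par.2.1).getD c [], v ∈ pvU (PySem.Dict.ofList par.2.1) :=
    fun c v hv => nbrs_mem_pvU _ c v hv
  have := fold_sim (PySem.Dict.ofList par.2.1) (pvU_len_bound par.2.1 hlen) hnbU
    par.2.2 PySem.Dict.empty []
    (by intro k hk; rw [PySem.Dict.keys_empty] at hk; cases hk)
    PySem.Dict.nodup_keys_empty
    (fun q hqm => ⟨(hq q hqm).2.1, (hq q hqm).2.2⟩)
  simpa using this
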